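-- pv_equiv track=rewrite | github.com/hoshinohikari/learning | test3.py | panduan
-- ===== SOURCE A (Python) =====
-- def panduan(s):
--   a = b = c = q = z = h = 0
--
--   for i in range(len(s)):
--     if(s[i] == 'A'):
--       if(a == 0 and b == 0):
--         q = q + 1
--       elif(a == 1 and b == 0):
--         z = z + 1
--       elif(a == 1 and b == 1):
--         h = h + 1
--     elif(s[i] == 'P'):
--       a = a + 1
--     elif(s[i] == 'T'):
--       b = b + 1
--     else:
--       c = 0
--       return c
--
--   if(h == q * z and z >= 1 and a == 1 and b == 1):
--     c = 1
--
--   return c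
-- ===== SOURCE B (Python) =====
-- def panduan(s):
--     if any(c not in 'APT' for c in s):
--         return 0
--     if s.count('P') != 1 or s.count('T') != 1:
--         return 0
--     p = s.index('P')
--     t = s.index('T')
--     z = t - p - 1
--     h = len(s) - t - 1
--     return 1 if h == p * z and z >= 1 else 0
-- ===== Notes on version B (the rewrite author's own statement) =====
-- stated objective: simpler
-- what changed: Replaces the character-by-character state machine (flags a,b with three phase counters) by a direct count/index formulation: validate the alphabet, require exactly one P-marker and one T-marker, then read the three segment lengths off the two marker indices and the total length and test h == p*z and z >= 1.
import Mathlib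
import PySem

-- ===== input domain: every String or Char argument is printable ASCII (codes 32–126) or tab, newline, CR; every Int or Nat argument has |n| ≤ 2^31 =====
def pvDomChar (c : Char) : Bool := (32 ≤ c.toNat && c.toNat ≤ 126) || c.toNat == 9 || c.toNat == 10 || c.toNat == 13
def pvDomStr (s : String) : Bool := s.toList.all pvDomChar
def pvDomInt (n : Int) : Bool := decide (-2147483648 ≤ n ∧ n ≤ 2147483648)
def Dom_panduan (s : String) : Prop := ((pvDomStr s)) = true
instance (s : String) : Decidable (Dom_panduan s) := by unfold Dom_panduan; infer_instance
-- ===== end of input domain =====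

-- B replaces A's one-pass state machine by count/index arithmetic: same value everywhere (objective: simpler).

-- ===== PORT A =====
-- the for-loop with its early return; state (a, b, q, z, h); none = the 'return 0' on an invalid char
def loopA : List Char → Int → Int → Int → Int → Int → Option (Int × Int × Int × Int × Int)
  | [], a, b, q, z, h => some (a, b, q, z, h)
  | c :: rest, a, b, q, z, h =>
    if c = 'A' then
      if a = 0 ∧ b = 0 then loopA rest a b (q + 1) z h
      else if a = 1 ∧ b = 0 then loopA rest a b q (z + 1) h
      else if a = 1 ∧ b = 1 then loopA rest a b q z (h + 1)
      else loopA rest a b q z h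
    else if c = 'P' then loopA rest (a + 1) b q z h
    else if c = 'T' then loopA rest a (b + 1) q z h
    else none

def panduan (s : String) : Int :=
  match loopA s.toList 0 0 0 0 0 with
  | none => 0
  | some (a, b, q, z, h) => if h = q * z ∧ z ≥ 1 ∧ a = 1 ∧ b = 1 then 1 else 0

-- ===== PORT B =====
def panduan_alt (s : String) : Int :=
  let l := s.toList
  if l.any (fun c => !(c == 'A' || c == 'P' || c == 'T')) then 0
  else if l.count 'P' ≠ 1 ∨ l.count 'T' ≠ 1 then 0
  else
    -- s.index('P') / s.index('T'): both present (count = 1), so index? is some; the 0 arm is unreachable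
    match PySem.List.index? l 'P', PySem.List.index? l 'T' with
    | some p, some t =>
      let z : Int := (t : Int) - p - 1
      let h : Int := (l.length : Int) - t - 1
      if h = (p : Int) * z ∧ z ≥ 1 then 1 else 0
    | _, _ => 0

-- ===== PRECONDITION & SPEC =====
def Spec_panduan (s : String) (out : Int) : Prop := out = panduan_alt s
instance (s : String) (out : Int) : Decidable (Spec_panduan s out) := by unfold Spec_panduan; infer_instance

-- ===== CLAIM (what is proved, stated in full; the proofs are below) =====
def Claim_equal_panduan : Prop := ∀ (s : String), Dom_panduan s → Spec_panduan s (panduan s)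

def goodC (c : Char) : Bool := c == 'A' || c == 'P' || c == 'T'

lemma loopA_invalid (l : List Char) (hl : ¬ l.all goodC = true) :
    ∀ a b q z h, loopA l a b q z h = none := by
  induction l with
  | nil => simp at hl
  | cons c rest ih =>
    intro a b q z h
    by_cases hc : goodC c = true
    · have hrest : ¬ rest.all goodC = true := by
        simp [List.all_cons, hc] at hl ⊢; exact hl
      simp only [loopA]
      split_ifs <;>
        first
          | exact ih hrest _ _ _ _ _
          | (exfalso; simp [goodC] at hc; tauto)
    · have h1 : ¬ c = 'A' := by simp [goodC] at hc; tauto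
      have h2 : ¬ c = 'P' := by simp [goodC] at hc; tauto
      have h3 : ¬ c = 'T' := by simp [goodC] at hc; tauto
      simp only [loopA, if_neg h1, if_neg h2, if_neg h3]

lemma loopA_valid (l : List Char) (hl : l.all goodC = true) :
    ∀ a b q z h, ∃ q' z' h',
      loopA l a b q z h = some (a + l.count 'P', b + l.count 'T', q', z', h') := by
  induction l with
  | nil => intro a b q z h; exact ⟨q, z, h, by simp [loopA]⟩
  | cons c rest ih =>
    intro a b q z h
    rw [List.all_cons, Bool.and_eq_true] at hl
    have hc : goodC c = true := hl.1
    have hrest : rest.all goodC = true := hl.2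
    by_cases h1 : c = 'A'
    · subst h1
      simp only [loopA, if_pos rfl]
      have hcnt : ∀ q0 z0 h0, ∃ q' z' h',
          loopA rest a b q0 z0 h0 =
            some (a + (('A'::rest).count 'P' : Int), b + (('A'::rest).count 'T' : Int), q', z', h') := by
        intro q0 z0 h0
        obtain ⟨q', z', h', e⟩ := ih hrest a b q0 z0 h0
        exact ⟨q', z', h', by rw [e]; simp [List.count_cons]⟩
      split_ifs <;> exact hcnt _ _ _
    · by_cases h2 : c = 'P'
      · subst h2
        obtain ⟨q', z', h', e⟩ := ih hrest (a + 1) b q z h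
        refine ⟨q', z', h', ?_⟩
        simp only [loopA]
        rw [if_neg h1, if_pos trivial, e]
        simp [List.count_cons]
        try omega
      · have h3 : c = 'T' := by simp [goodC, h1, h2] at hc; exact hc
        subst h3
        obtain ⟨q', z', h', e⟩ := ih hrest a (b + 1) q z h
        refine ⟨q', z', h', ?_⟩
        simp only [loopA]
        rw [if_neg h1, if_neg h2, if_pos trivial, e]
        simp [List.count_cons]
        try omega

lemma loopA_repA_00 (n : Nat) (l : List Char) (q z h : Int) :
    loopA (List.replicate n 'A' ++ l) 0 0 q z h = loopA l 0 0 (q + n) z h := by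
  induction n generalizing q with
  | zero => simp
  | succ m ih =>
    rw [List.replicate_succ, List.cons_append]
    simp only [loopA]
    norm_num
    rw [ih]
    push_cast
    ring_nf

lemma loopA_repA_10 (n : Nat) (l : List Char) (q z h : Int) :
    loopA (List.replicate n 'A' ++ l) 1 0 q z h = loopA l 1 0 q (z + n) h := by
  induction n generalizing z with
  | zero => simp
  | succ m ih =>
    rw [List.replicate_succ, List.cons_append]
    simp only [loopA]
    norm_num
    rw [ih]
    push_cast
    ring_nf

lemma loopA_repA_11 (n : Nat) (l : List Char) (q z h : Int) :
    loopA (List.replicate n 'A' ++ l) 1 1 q z h = loopA l 1 1 q z (h + n) := by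
  induction n generalizing h with
  | zero => simp
  | succ m ih =>
    rw [List.replicate_succ, List.cons_append]
    simp only [loopA]
    norm_num
    rw [ih]
    push_cast
    ring_nf

lemma loopA_repA_01 (n : Nat) (l : List Char) (q z h : Int) :
    loopA (List.replicate n 'A' ++ l) 0 1 q z h = loopA l 0 1 q z h := by
  induction n with
  | zero => simp
  | succ m ih =>
    rw [List.replicate_succ, List.cons_append]
    simp only [loopA]
    norm_num
    rw [ih]

lemma loopA_shapePT (u x y : Nat) :
    loopA (List.replicate u 'A' ++ 'P' :: (List.replicate x 'A' ++ 'T' :: List.replicate y 'A'))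
      0 0 0 0 0 = some (1, 1, (u : Int), (x : Int), (y : Int)) := by
  rw [loopA_repA_00]
  simp only [loopA]
  norm_num
  rw [loopA_repA_10]
  simp only [loopA]
  norm_num
  rw [show (List.replicate y 'A') = List.replicate y 'A' ++ ([] : List Char) from by simp,
      loopA_repA_11]
  simp [loopA]

lemma loopA_shapeTP (u x y : Nat) :
    loopA (List.replicate u 'A' ++ 'T' :: (List.replicate x 'A' ++ 'P' :: List.replicate y 'A'))
      0 0 0 0 0 = some (1, 1, (u : Int), 0, (y : Int)) := by
  rw [loopA_repA_00]
  simp only [loopA]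
  norm_num
  rw [loopA_repA_01]
  simp only [loopA]
  norm_num
  rw [show (List.replicate y 'A') = List.replicate y 'A' ++ ([] : List Char) from by simp,
      loopA_repA_11]
  simp [loopA]

lemma split_one (l : List Char) (c : Char) (h : l.count c = 1) :
    ∃ u v, l = u ++ c :: v ∧ c ∉ u ∧ c ∉ v := by
  induction l with
  | nil => simp at h
  | cons d rest ih =>
    by_cases hd : d = c
    · subst hd
      have : rest.count d = 0 := by simpa [List.count_cons] using h
      exact ⟨[], rest, by simp, by simp, by rw [← List.count_eq_zero]; exact this⟩
    · have : rest.count c = 1 := by simpa [List.count_cons, hd] using h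
      obtain ⟨u, v, e, hu, hv⟩ := ih this
      exact ⟨d :: u, v, by simp [e], by simp [hu, Ne.symm, hd], hv⟩

lemma allA (l : List Char) (hv : l.all goodC = true) (hP : 'P' ∉ l) (hT : 'T' ∉ l) :
    l = List.replicate l.length 'A' := by
  rw [List.eq_replicate_iff]
  refine ⟨rfl, fun b hb => ?_⟩
  have := (List.all_eq_true.mp hv) b hb
  simp [goodC] at this
  rcases this with (h | h) | h
  · exact h
  · exact absurd (h ▸ hb) hP
  · exact absurd (h ▸ hb) hT

lemma all_sub {l m : List Char} (h : m.all goodC = true) (hsub : ∀ c, c ∈ l → c ∈ m) :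
    l.all goodC = true :=
  List.all_eq_true.mpr fun c hc => List.all_eq_true.mp h c (hsub c hc)

lemma shape (l : List Char) (hv : l.all goodC = true)
    (hP : l.count 'P' = 1) (hT : l.count 'T' = 1) :
    (∃ u x y, l = List.replicate u 'A' ++ 'P' :: (List.replicate x 'A' ++ 'T' :: List.replicate y 'A')) ∨
    (∃ u x y, l = List.replicate u 'A' ++ 'T' :: (List.replicate x 'A' ++ 'P' :: List.replicate y 'A')) := by
  obtain ⟨u, v, e, huP, hvP⟩ := split_one l 'P' hP
  subst e
  have hall := List.all_eq_true.mp hv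
  have hTsplit : u.count 'T' + v.count 'T' = 1 := by
    have := hT
    simp [List.count_append, List.count_cons] at this
    omega
  by_cases hTu : u.count 'T' = 1
  · -- T inside u: T-before-P shape
    have hTv : 'T' ∉ v := by rw [← List.count_eq_zero]; omega
    obtain ⟨u1, u2, eu, h1, h2⟩ := split_one u 'T' hTu
    subst eu
    have e1 : u1 = List.replicate u1.length 'A' :=
      allA u1 (all_sub hv (by intro c hc; simp [hc]))
        (fun hm => huP (by simp [hm])) h1
    have e2 : u2 = List.replicate u2.length 'A' :=
      allA u2 (all_sub hv (by intro c hc; simp [hc]))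
        (fun hm => huP (by simp [hm])) h2
    have e3 : v = List.replicate v.length 'A' :=
      allA v (all_sub hv (by intro c hc; simp [hc])) hvP hTv
    right
    exact ⟨u1.length, u2.length, v.length, by
      rw [← e1, ← e2, ← e3]; simp⟩
  · -- T inside v: P-before-T shape
    have hTu0 : 'T' ∉ u := by rw [← List.count_eq_zero]; omega
    have hTv : v.count 'T' = 1 := by omega
    obtain ⟨v1, v2, ev, h1, h2⟩ := split_one v 'T' hTv
    subst ev
    have e1 : u = List.replicate u.length 'A' :=
      allA u (all_sub hv (by intro c hc; simp [hc])) huP hTu0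
    have e2 : v1 = List.replicate v1.length 'A' :=
      allA v1 (all_sub hv (by intro c hc; simp [hc]))
        (fun hm => hvP (by simp [hm])) h1
    have e3 : v2 = List.replicate v2.length 'A' :=
      allA v2 (all_sub hv (by intro c hc; simp [hc]))
        (fun hm => hvP (by simp [hm])) h2
    left
    exact ⟨u.length, v1.length, v2.length, by rw [← e1, ← e2, ← e3]⟩

lemma index?_shape_first (pre suf : List Char) (c : Char) (hc : c ∉ pre) :
    PySem.List.index? (pre ++ c :: suf) c = some pre.length := by
  rw [PySem.List.index?_eq_some_iff]
  exact ⟨pre, suf, rfl, rfl, hc⟩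

theorem panduan_spec : Claim_equal_panduan := by
  unfold Claim_equal_panduan Spec_panduan
  intro s _
  unfold panduan panduan_alt
  by_cases hv : s.toList.all goodC = true
  · have hany : (s.toList.any fun c => !(c == 'A' || c == 'P' || c == 'T')) = false := by
      rw [List.any_eq_false]
      intro c hc
      have := List.all_eq_true.mp hv c hc
      simp [goodC] at this ⊢
      tauto
    by_cases hP : s.toList.count 'P' = 1
    · by_cases hT : s.toList.count 'T' = 1
      · rcases shape s.toList hv hP hT with ⟨u, x, y, e⟩ | ⟨u, x, y, e⟩
        · -- P before T
          rw [e] at hany hP hT ⊢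
          rw [loopA_shapePT]
          have iP : PySem.List.index?
              (List.replicate u 'A' ++ 'P' :: (List.replicate x 'A' ++ 'T' :: List.replicate y 'A')) 'P'
              = some u := by
            have h0 := index?_shape_first (List.replicate u 'A')
              (List.replicate x 'A' ++ 'T' :: List.replicate y 'A') 'P'
              (by simp [List.mem_replicate])
            rw [h0]
            simp
          have iT : PySem.List.index?
              (List.replicate u 'A' ++ 'P' :: (List.replicate x 'A' ++ 'T' :: List.replicate y 'A')) 'T'
              = some (u + 1 + x) := by
            have h0 := index?_shape_first (List.replicate u 'A' ++ 'P' :: List.replicate x 'A')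
              (List.replicate y 'A') 'T' (by simp [List.mem_replicate])
            have e2 : (List.replicate u 'A' ++ 'P' :: List.replicate x 'A') ++ 'T' :: List.replicate y 'A'
                = List.replicate u 'A' ++ 'P' :: (List.replicate x 'A' ++ 'T' :: List.replicate y 'A') := by
              simp
            rw [e2] at h0
            rw [h0]
            congr 1
            simp
            omega
          simp only [hany, iP, iT]
          rw [if_neg Bool.false_ne_true, if_neg (not_or.mpr ⟨not_not_intro hP, not_not_intro hT⟩)]
          have hlen : (List.replicate u 'A' ++ 'P' :: (List.replicate x 'A' ++ 'T' :: List.replicate y 'A')).length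
              = u + 1 + x + 1 + y := by
            simp
            omega
          rw [hlen]
          have e1 : ((u + 1 + x : Nat) : Int) - (u : Int) - 1 = (x : Int) := by push_cast; ring
          have e2 : ((u + 1 + x + 1 + y : Nat) : Int) - ((u + 1 + x : Nat) : Int) - 1 = (y : Int) := by
            push_cast; ring
          rw [e1, e2]
          simp
        · -- T before P
          rw [e] at hany hP hT ⊢
          rw [loopA_shapeTP]
          have iT : PySem.List.index?
              (List.replicate u 'A' ++ 'T' :: (List.replicate x 'A' ++ 'P' :: List.replicate y 'A')) 'T'
              = some u := by
            have h0 := index?_shape_first (List.replicate u 'A')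
              (List.replicate x 'A' ++ 'P' :: List.replicate y 'A') 'T'
              (by simp [List.mem_replicate])
            rw [h0]
            simp
          have iP : PySem.List.index?
              (List.replicate u 'A' ++ 'T' :: (List.replicate x 'A' ++ 'P' :: List.replicate y 'A')) 'P'
              = some (u + 1 + x) := by
            have h0 := index?_shape_first (List.replicate u 'A' ++ 'T' :: List.replicate x 'A')
              (List.replicate y 'A') 'P' (by simp [List.mem_replicate])
            have e2 : (List.replicate u 'A' ++ 'T' :: List.replicate x 'A') ++ 'P' :: List.replicate y 'A'
                = List.replicate u 'A' ++ 'T' :: (List.replicate x 'A' ++ 'P' :: List.replicate y 'A') := by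
              simp
            rw [e2] at h0
            rw [h0]
            congr 1
            simp
            omega
          simp only [hany, iP, iT]
          rw [if_neg Bool.false_ne_true, if_neg (not_or.mpr ⟨not_not_intro hP, not_not_intro hT⟩)]
          rw [if_neg (by rintro ⟨-, h2, -⟩; omega)]
          rw [if_neg (by rintro ⟨-, h2⟩; push_cast at h2; omega)]
      · -- count 'T' ≠ 1: both 0
        obtain ⟨q', z', h', e⟩ := loopA_valid s.toList hv 0 0 0 0 0
        rw [e]
        simp only [hany]
        rw [if_neg (by rintro ⟨-, -, -, hb⟩; rw [zero_add] at hb; omega)]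
        simp [hT]
    · -- count 'P' ≠ 1: both 0
      obtain ⟨q', z', h', e⟩ := loopA_valid s.toList hv 0 0 0 0 0
      rw [e]
      simp only [hany]
      rw [if_neg (by rintro ⟨-, -, ha, -⟩; rw [zero_add] at ha; omega)]
      simp [hP]
  · -- invalid character: both 0
    have hany : (s.toList.any fun c => !(c == 'A' || c == 'P' || c == 'T')) = true := by
      rw [List.any_eq_true]
      rw [List.all_eq_true] at hv
      push_neg at hv
      obtain ⟨c, hc, hgc⟩ := hv
      refine ⟨c, hc, ?_⟩
      simp [goodC] at hgc ⊢
      tauto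
    rw [loopA_invalid s.toList hv]
    simp
    intro hall _ _
    exfalso
    apply hv
    rw [List.all_eq_true]
    intro c hc
    have := hall c hc
    simp [goodC]
    tauto
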